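-- pv_equiv track=rewrite | github.com/LegendZDY/nanoMD | nanomd/utils/oldmodifications.py | posFind
-- ===== SOURCE A (Python) =====
-- def posFind(modList):
--     counter = 0
--     posList = []
--     for mod in modList:
--         counter += int(mod)
--         posList.append(counter)
--         counter += 1
--     return posList
-- ===== SOURCE B (Python) =====
-- def posFind(modList):
--     # Divide and conquer: solve each half independently, then shift the
--     # right half's positions by (last left position + 1).
--     n = len(modList)
--     if n == 0:
--         return []
--     if n == 1:
--         return [int(modList[0])]
--     mid = n // 2
--     left = posFind(modList[:mid])
--     right = posFind(modList[mid:])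
--     off = left[-1] + 1
--     return left + [off + p for p in right]
-- ===== Notes on version B (the rewrite author's own statement) =====
-- stated objective: alternative
-- what changed: Replaces A's single left-to-right loop with a mutating counter by a divide-and-conquer: each half of the list is solved independently and the right half's positions are shifted by the last left position plus one.
import Mathlib
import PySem

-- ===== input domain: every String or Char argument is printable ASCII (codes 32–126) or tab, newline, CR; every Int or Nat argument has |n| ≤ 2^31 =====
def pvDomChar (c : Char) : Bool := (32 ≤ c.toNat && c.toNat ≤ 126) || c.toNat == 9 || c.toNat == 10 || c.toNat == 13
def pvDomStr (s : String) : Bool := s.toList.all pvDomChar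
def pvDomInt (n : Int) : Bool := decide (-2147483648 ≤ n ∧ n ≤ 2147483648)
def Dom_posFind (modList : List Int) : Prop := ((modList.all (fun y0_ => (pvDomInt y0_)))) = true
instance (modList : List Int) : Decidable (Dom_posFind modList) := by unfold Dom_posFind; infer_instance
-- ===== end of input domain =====

-- B replaces A's single left-to-right counter loop by divide-and-conquer (solve halves, shift the right half); same result, different algorithm, no speed claim.
-- ===== PORT A =====
def posFind (modList : List Int) : List Int :=
  (modList.foldl (fun (s : Int × List Int) mod =>
      let counter := s.1 + mod
      (counter + 1, s.2 ++ [counter])) ((0 : Int), ([] : List Int))).2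

-- ===== PORT B =====
def posFind_alt (l : List Int) : List Int :=
  if _h0 : l.length = 0 then []
  else if _h1 : l.length = 1 then [l.headI]   -- [int(modList[0])]; headI = l[0] on a nonempty list
  else
    let mid := l.length / 2
    let left := posFind_alt (l.take mid)
    let right := posFind_alt (l.drop mid)
    let off := left.getLast! + 1              -- left[-1] + 1; left is nonempty (mid ≥ 1)
    left ++ right.map (fun p => off + p)
termination_by l.length
decreasing_by
  · simp only [List.length_take]; omega
  · simp only [List.length_drop]; omega

-- ===== PRECONDITION & SPEC =====
def Spec_posFind (modList : List Int) (out : List Int) : Prop := out = posFind_alt modList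
instance (modList : List Int) (out : List Int) : Decidable (Spec_posFind modList out) := by unfold Spec_posFind; infer_instance

-- ===== CLAIM (what is proved, stated in full; the proofs are below) =====
def Claim_equal_posFind : Prop := ∀ (modList : List Int), Dom_posFind modList → Spec_posFind modList (posFind modList)

-- ===== LEMMAS AND PROOFS =====
-- proof-side characterisation of the common result: entry i = c + (sum of first i+1 mods) + i
def pvBody (l : List Int) (c : Int) : List Int :=
  match l with
  | [] => []
  | m :: t => (c + m) :: pvBody t (c + m + 1)

-- counter value after processing l starting from c
def pvAfter (l : List Int) (c : Int) : Int :=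
  match l with
  | [] => c
  | m :: t => pvAfter t (c + m + 1)

theorem pvA_loop (l : List Int) (c : Int) (acc : List Int) :
    (l.foldl (fun (s : Int × List Int) mod =>
      let counter := s.1 + mod
      (counter + 1, s.2 ++ [counter])) (c, acc)).2 = acc ++ pvBody l c := by
  induction l generalizing c acc with
  | nil => simp [pvBody]
  | cons m t ih => simp [List.foldl, pvBody, ih, List.append_assoc]

theorem pvBody_shift (l : List Int) (c d : Int) :
    (pvBody l c).map (fun p => d + p) = pvBody l (d + c) := by
  induction l generalizing c with
  | nil => simp [pvBody]
  | cons m t ih =>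
    simp only [pvBody, List.map_cons]
    refine List.cons_eq_cons.mpr ⟨by ring, ?_⟩
    rw [ih]; ring_nf

theorem pvBody_append (a b : List Int) (c : Int) :
    pvBody (a ++ b) c = pvBody a c ++ pvBody b (pvAfter a c) := by
  induction a generalizing c with
  | nil => simp [pvBody, pvAfter]
  | cons m t ih => simp [pvBody, pvAfter, ih]

theorem pvBody_getLast (a : List Int) (c : Int) (h : a ≠ []) :
    (pvBody a c).getLast! + 1 = pvAfter a c := by
  induction a generalizing c with
  | nil => exact absurd rfl h
  | cons m t ih =>
    cases t with
    | nil => simp [pvBody, pvAfter, List.getLast!, List.getLast]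
    | cons m2 t2 =>
      simp only [pvBody, pvAfter]
      rw [show ((c + m) :: (c + m + 1 + m2) :: pvBody t2 (c + m + 1 + m2 + 1)).getLast!
            = ((c + m + 1 + m2) :: pvBody t2 (c + m + 1 + m2 + 1)).getLast! by
          simp [List.getLast!, List.getLast]]
      have := ih (c + m + 1) (by simp)
      simpa [pvBody] using this

theorem pvAlt_eq_body (l : List Int) : posFind_alt l = pvBody l 0 := by
  induction l using posFind_alt.induct with
  | case1 l h0 =>
    rw [posFind_alt]
    simp only [h0, dite_true]
    have : l = [] := List.length_eq_zero_iff.mp h0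
    simp [this, pvBody]
  | case2 l h0 h1 =>
    rw [posFind_alt]
    simp only [h1, dite_true]
    obtain ⟨m, hm⟩ := List.length_eq_one_iff.mp h1
    simp [hm, pvBody]
  | case3 l h0 h1 _mid ihl ihr =>
    rw [posFind_alt]
    simp only [h0, dite_false, h1, dite_false]
    have htake : l.take (l.length / 2) ≠ [] := by
      intro h
      have := congrArg List.length h
      simp only [List.length_take, List.length_nil] at this
      omega
    rw [ihl, ihr, pvBody_getLast _ _ htake, pvBody_shift]
    have := pvBody_append (l.take (l.length / 2)) (l.drop (l.length / 2)) 0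
    rw [List.take_append_drop] at this
    rw [add_zero, ← this]

-- ===== VERDICT (by name: the statement is the Claim_ definition above) =====
theorem posFind_spec : Claim_equal_posFind := by
  intro l _
  unfold Spec_posFind posFind
  rw [pvA_loop, pvAlt_eq_body]
  simp
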